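-- pv_equiv track=rewrite | github.com/AlexB-arch/portfolio | Python/designFive.py | goof
-- ===== SOURCE A (Python) =====
-- def goof(s: str) -> int:
--     def calculate_z(s: str) -> list:
--         z = [0] * len(s)
--         l, r, k = 0, 0, 0
--         for i in range(1, len(s)):
--             if i > r:
--                 l, r = i, i
--                 while r < len(s) and s[r] == s[r - l]:
--                     r += 1
--                 z[i] = r - l
--                 r -= 1
--             else:
--                 k = i - l
--                 if z[k] < r - i + 1:
--                     z[i] = z[k]
--                 else:
--                     l = i
--                     while r < len(s) and s[r] == s[r - l]:
--                         r += 1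
--                     z[i] = r - l
--                     r -= 1
--         return z
--
--     n = len(s)
--
--     # We will concatenate the string with its reverse to look for palindromes
--     combined = s + s[::-1]
--     z = calculate_z(combined)
--
--     # Now find the longest foldable part
--     max_fold = 0
--     for i in range(n, len(combined)):
--         if z[i] >= len(combined) - i:  # Checking palindrome property
--             max_fold = max(max_fold, len(combined) - i)
--
--     # The minimal length after folding is the original length minus the maximal fold
--     return n - max_fold
-- ===== SOURCE B (Python) =====
-- def goof(s: str) -> int:
--     n = len(s)
--     for k in range(n, 0, -1):
--         p = s[:k]
--         if p == p[::-1]: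
--             return n - k
--     return n
-- ===== Notes on version B (the rewrite author's own statement) =====
-- stated objective: simpler
-- what changed: Replaces the Z-algorithm over s + reversed(s) plus a scanning max-fold loop with a direct downward scan that returns at the longest palindromic prefix of s; the palindrome test is a C-level slice comparison instead of per-character Python loops.
import Mathlib
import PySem

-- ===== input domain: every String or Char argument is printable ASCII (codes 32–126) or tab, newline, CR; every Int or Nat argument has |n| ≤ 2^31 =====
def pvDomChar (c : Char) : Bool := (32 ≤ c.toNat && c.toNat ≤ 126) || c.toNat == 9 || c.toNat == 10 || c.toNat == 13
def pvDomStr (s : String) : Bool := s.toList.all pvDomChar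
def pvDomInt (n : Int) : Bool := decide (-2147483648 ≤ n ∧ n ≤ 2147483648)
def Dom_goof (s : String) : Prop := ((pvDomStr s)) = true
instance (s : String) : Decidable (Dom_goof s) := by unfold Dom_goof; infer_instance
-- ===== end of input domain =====

-- B replaces the Z-algorithm over s + reversed(s) with a direct downward scan for the
-- longest palindromic prefix of s (simpler, not faster); both are proved to return n - (that length).

-- ===== PORT A =====
-- `while r < len(s) and s[r] == s[r - l]: r += 1` of calculate_z; the reads are guarded by
-- r < len (and r - l ≤ r), so List.getD with a dummy default is exact here.
def zwhile (cs : List Char) (l r : Nat) : Nat :=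
  if _h : r < cs.length then
    if cs.getD r ' ' = cs.getD (r - l) ' ' then zwhile cs l (r + 1) else r
  else r
termination_by cs.length - r
decreasing_by omega

-- one iteration of `for i in range(1, len(s))` in calculate_z; state (z, l, r)
def zstep (cs : List Char) (st : List Nat × Nat × Nat) (i : Nat) : List Nat × Nat × Nat :=
  let z := st.1; let l := st.2.1; let r := st.2.2
  if i > r then
    let r' := zwhile cs i i              -- l, r = i, i; while …
    (z.set i (r' - i), i, r' - 1)        -- z[i] = r - l; r -= 1
  else
    let k := i - l
    if z.getD k 0 < r - i + 1 then
      (z.set i (z.getD k 0), l, r)       -- z[i] = z[k]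
    else
      let r' := zwhile cs i r            -- l = i; while …
      (z.set i (r' - i), i, r' - 1)      -- z[i] = r - l; r -= 1

def calcZ (cs : List Char) : List Nat :=
  ((List.range' 1 (cs.length - 1)).foldl (zstep cs) (List.replicate cs.length 0, 0, 0)).1

def goof (s : String) : Int :=
  let n := s.toList.length
  let cs := s.toList ++ s.toList.reverse          -- combined = s + s[::-1]
  let z := calcZ cs
  let mf := (List.range' n n).foldl               -- for i in range(n, len(combined))
      (fun mf i => if z.getD i 0 ≥ cs.length - i then max mf (cs.length - i) else mf) 0
  (n : Int) - (mf : Int)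

-- ===== PORT B =====
-- `for k in range(n, 0, -1): p = s[:k]; if p == p[::-1]: return n - k` ; falls through to `return n`
def palLoop (t : List Char) (n : Nat) : Nat → Int
  | 0 => (n : Int)
  | k + 1 =>
    let p := t.take (k + 1)
    if p = p.reverse then (n : Int) - ((k : Int) + 1) else palLoop t n k

def goof_alt (s : String) : Int := palLoop s.toList s.toList.length s.toList.length

-- ===== PRECONDITION & SPEC =====
def Spec_goof (s : String) (out : Int) : Prop := out = goof_alt s
instance (s : String) (out : Int) : Decidable (Spec_goof s out) := by unfold Spec_goof; infer_instance

-- ===== CLAIM (what is proved, stated in full; the proofs are below) =====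
def Claim_equal_goof : Prop := ∀ (s : String), Dom_goof s → Spec_goof s (goof s)

-- ===== LEMMAS AND PROOFS =====

-- length of the longest common prefix of two lists
def lcpA : List Char → List Char → Nat
  | a :: as, b :: bs => if a = b then lcpA as bs + 1 else 0
  | _, _ => 0

-- Z-value: length of the longest common prefix of cs and cs[i:]
def lcp (cs : List Char) (i : Nat) : Nat := lcpA cs (cs.drop i)

theorem lcpA_le_right : ∀ x y : List Char, lcpA x y ≤ y.length := by
  intro x
  induction x with
  | nil => intro y; simp [lcpA]
  | cons a as ih =>
    intro y; cases y with
    | nil => simp [lcpA]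
    | cons b bs =>
      simp only [lcpA, List.length_cons]
      split
      · exact Nat.succ_le_succ (ih bs)
      · omega

theorem lcpA_get : ∀ (x y : List Char) (j : Nat) (d : Char), j < lcpA x y →
    x.getD j d = y.getD j d := by
  intro x
  induction x with
  | nil => intro y j d h; simp [lcpA] at h
  | cons a as ih =>
    intro y j d h
    cases y with
    | nil => simp [lcpA] at h
    | cons b bs =>
      simp only [lcpA] at h
      by_cases hab : a = b
      · rw [if_pos hab] at h
        cases j with
        | zero => simpa using hab
        | succ j => simp only [List.getD_cons_succ]; exact ih bs j d (by omega)
      · rw [if_neg hab] at h; omega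

theorem lcpA_mismatch : ∀ (x y : List Char) (d : Char), lcpA x y < x.length →
    lcpA x y < y.length → x.getD (lcpA x y) d ≠ y.getD (lcpA x y) d := by
  intro x
  induction x with
  | nil => intro y d h _; simp at h
  | cons a as ih =>
    intro y d hx hy
    cases y with
    | nil => simp at hy
    | cons b bs =>
      simp only [lcpA] at *
      by_cases hab : a = b
      · rw [if_pos hab] at *
        simp only [List.getD_cons_succ]
        exact ih bs d (by simpa using hx) (by simpa using hy)
      · rw [if_neg hab] at *
        simpa using hab

theorem lcpA_ge : ∀ (x y : List Char) (m : Nat) (d : Char), m ≤ x.length → m ≤ y.length →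
    (∀ j, j < m → x.getD j d = y.getD j d) → m ≤ lcpA x y := by
  intro x
  induction x with
  | nil => intro y m d hx _ _; simp at hx; omega
  | cons a as ih =>
    intro y m d hx hy hj
    cases y with
    | nil => simp at hy; omega
    | cons b bs =>
      cases m with
      | zero => omega
      | succ m =>
        have h0 := hj 0 (by omega)
        simp only [List.getD_cons_zero] at h0
        simp only [lcpA, if_pos h0]
        have := ih bs m d (by simpa using hx) (by simpa using hy)
          (fun j hjm => by
            have := hj (j + 1) (by omega)
            simpa only [List.getD_cons_succ] using this)
        omega

theorem lcpA_ge_iff : ∀ (k : Nat) (x y : List Char), k ≤ lcpA x y ↔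
    (k ≤ x.length ∧ k ≤ y.length ∧ x.take k = y.take k) := by
  intro k
  induction k with
  | zero => intro x y; simp
  | succ k ih =>
    intro x y
    cases x with
    | nil => simp [lcpA]
    | cons a as =>
      cases y with
      | nil => simp [lcpA]
      | cons b bs =>
        simp only [lcpA, List.length_cons, List.take_succ_cons]
        by_cases hab : a = b
        · rw [if_pos hab]
          constructor
          · intro h
            have := (ih as bs).mp (by omega)
            refine ⟨by omega, by omega, by simp [hab, this.2.2]⟩
          · rintro ⟨h1, h2, h3⟩
            have h3' : a = b ∧ as.take k = bs.take k := by simpa using h3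
            have := (ih as bs).mpr ⟨by omega, by omega, h3'.2⟩
            omega
        · rw [if_neg hab]
          constructor
          · omega
          · rintro ⟨_, _, h3⟩
            have h3' : a = b ∧ as.take k = bs.take k := by simpa using h3
            exact absurd h3'.1 hab

theorem lcpA_self : ∀ x : List Char, lcpA x x = x.length := by
  intro x
  induction x with
  | nil => simp [lcpA]
  | cons a as ih => simp [lcpA, ih]

theorem getD_drop (cs : List Char) (i j : Nat) (d : Char) :
    (cs.drop i).getD j d = cs.getD (i + j) d := by
  simp [List.getD_eq_getElem?_getD, List.getElem?_drop]

theorem lcp_le (cs : List Char) (i : Nat) (h : i ≤ cs.length) : i + lcp cs i ≤ cs.length := by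
  have := lcpA_le_right cs (cs.drop i)
  simp only [List.length_drop] at this
  unfold lcp; omega

theorem lcp_get (cs : List Char) (i j : Nat) (d : Char) (h : j < lcp cs i) :
    cs.getD j d = cs.getD (i + j) d := by
  have := lcpA_get cs (cs.drop i) j d h
  rwa [getD_drop] at this

theorem lcp_mismatch (cs : List Char) (i : Nat) (d : Char) (h : i + lcp cs i < cs.length) :
    cs.getD (lcp cs i) d ≠ cs.getD (i + lcp cs i) d := by
  have h' : i + lcpA cs (cs.drop i) < cs.length := h
  have hmm := lcpA_mismatch cs (cs.drop i) d (by omega)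
    (by simp only [List.length_drop]; omega)
  rw [getD_drop] at hmm
  unfold lcp
  exact hmm

theorem lcp_ge (cs : List Char) (i m : Nat) (d : Char) (hm : i + m ≤ cs.length)
    (h : ∀ j, j < m → cs.getD j d = cs.getD (i + j) d) : m ≤ lcp cs i := by
  refine lcpA_ge cs (cs.drop i) m d (by omega) (by simp only [List.length_drop]; omega) ?_
  intro j hj
  rw [getD_drop]
  exact h j hj

theorem zwhile_eq (cs : List Char) (l : Nat) (hl : l ≤ cs.length) :
    ∀ (k r : Nat), l ≤ r → r + k = l + lcp cs l → zwhile cs l r = l + lcp cs l := by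
  intro k
  induction k with
  | zero =>
    intro r hlr hr
    rw [zwhile]
    split
    · rename_i hlen
      rw [if_neg]
      · omega
      · have : r - l = lcp cs l := by omega
        rw [this]
        have : r = l + lcp cs l := by omega
        rw [this]
        exact fun he => lcp_mismatch cs l ' ' (by omega) he.symm
    · omega
  | succ k ih =>
    intro r hlr hr
    have hrlen : r < cs.length := by
      have := lcp_le cs l hl; omega
    rw [zwhile, dif_pos hrlen, if_pos]
    · exact ih (r + 1) (by omega) (by omega)
    · have hj : r - l < lcp cs l := by omega
      have := lcp_get cs l (r - l) ' ' hj
      have hli : l + (r - l) = r := by omega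
      rw [hli] at this
      exact this.symm

-- loop invariant of calculate_z after the iterations i = 1, …, m
def ZInv (cs : List Char) (m : Nat) (st : List Nat × Nat × Nat) : Prop :=
  st.1.length = cs.length ∧
  (∀ j, 1 ≤ j → j ≤ m → st.1.getD j 0 = lcp cs j) ∧
  st.2.1 ≤ m ∧ st.2.2 < cs.length ∧ (1 ≤ st.2.1 ∨ st.2.2 = 0) ∧
  st.2.2 + 1 ≤ st.2.1 + lcp cs st.2.1

theorem getD_set_self (z : List Nat) (i v : Nat) (h : i < z.length) :
    (z.set i v).getD i 0 = v := by
  simp [List.getD_eq_getElem?_getD, h]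

theorem getD_set_ne (z : List Nat) (i v j : Nat) (h : j ≠ i) :
    (z.set i v).getD j 0 = z.getD j 0 := by
  simp [List.getD_eq_getElem?_getD, List.getElem?_set_ne (by omega : i ≠ j)]

theorem zstep_inv (cs : List Char) (m : Nat) (hm : m + 2 ≤ cs.length)
    (st : List Nat × Nat × Nat) (h : ZInv cs m st) :
    ZInv cs (m + 1) (zstep cs st (m + 1)) := by
  obtain ⟨z, l, r⟩ := st
  obtain ⟨hzl, hzv, hlm, hr, hl0, hbox⟩ := h
  simp only at hzl hzv hlm hr hl0 hbox
  set i := m + 1 with hi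
  have hilen : i < cs.length := by omega
  unfold ZInv zstep
  dsimp only
  by_cases hir : i > r
  · rw [if_pos hir]
    dsimp only
    have hw : zwhile cs i i = i + lcp cs i :=
      zwhile_eq cs i (by omega) (lcp cs i) i (le_refl i) rfl
    have hle := lcp_le cs i (by omega)
    refine ⟨by simpa using hzl, ?_, by omega, by rw [hw]; omega, by omega, by rw [hw]; omega⟩
    intro j hj1 hjm
    by_cases hji : j = i
    · rw [hji, getD_set_self z i _ (by omega), hw]
      omega
    · rw [getD_set_ne z i _ j hji]
      exact hzv j hj1 (by omega)
  · rw [if_neg hir]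
    have hil : i ≤ r := by omega
    have hl1 : 1 ≤ l := by omega
    have hk1 : 1 ≤ i - l := by omega
    have hkm : i - l ≤ m := by omega
    have hzk : z.getD (i - l) 0 = lcp cs (i - l) := hzv (i - l) hk1 hkm
    set k := i - l with hkdef
    -- inside the z-box every position equals the corresponding prefix position
    have hb : ∀ p, p < r + 1 - l → cs.getD p ' ' = cs.getD (l + p) ' ' := by
      intro p hp
      exact lcp_get cs l p ' ' (by omega)
    by_cases hc : z.getD k 0 < r - i + 1
    · rw [if_pos hc]
      dsimp only
      rw [hzk] at hc
      -- lcp cs i = lcp cs k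
      have hlow : ∀ j, j < lcp cs k → cs.getD j ' ' = cs.getD (i + j) ' ' := by
        intro j hj
        have h1 := lcp_get cs k j ' ' hj
        have h2 := hb (k + j) (by omega)
        have he : l + (k + j) = i + j := by omega
        rw [he] at h2
        exact h1.trans h2
      have hge : lcp cs k ≤ lcp cs i :=
        lcp_ge cs i (lcp cs k) ' ' (by omega) hlow
      have hmis : cs.getD (lcp cs k) ' ' ≠ cs.getD (i + lcp cs k) ' ' := by
        have hkl : k + lcp cs k < cs.length := by omega
        have h1 := lcp_mismatch cs k ' ' hkl
        have h2 := hb (k + lcp cs k) (by omega)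
        have he : l + (k + lcp cs k) = i + lcp cs k := by omega
        rw [he] at h2
        rw [h2] at h1
        exact h1
      have hlt : lcp cs i ≤ lcp cs k := by
        by_contra hcon
        exact hmis (lcp_get cs i (lcp cs k) ' ' (by omega))
      have heq : lcp cs i = lcp cs k := le_antisymm hlt hge
      refine ⟨by simpa using hzl, ?_, by omega, hr, by omega, hbox⟩
      intro j hj1 hjm
      by_cases hji : j = i
      · rw [hji, getD_set_self z i _ (by omega), hzk, heq]
      · rw [getD_set_ne z i _ j hji]
        exact hzv j hj1 (by omega)
    · rw [if_neg hc]
      dsimp only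
      rw [hzk] at hc
      have hge : r + 1 - i ≤ lcp cs i := by
        refine lcp_ge cs i (r + 1 - i) ' ' (by omega) ?_
        intro j hj
        have h1 := lcp_get cs k j ' ' (by omega)
        have h2 := hb (k + j) (by omega)
        have he : l + (k + j) = i + j := by omega
        rw [he] at h2
        exact h1.trans h2
      have hw : zwhile cs i r = i + lcp cs i :=
        zwhile_eq cs i (by omega) (i + lcp cs i - r) r hil (by omega)
      have hle := lcp_le cs i (by omega)
      refine ⟨by simpa using hzl, ?_, by omega, by rw [hw]; omega, by omega, by rw [hw]; omega⟩
      intro j hj1 hjm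
      by_cases hji : j = i
      · rw [hji, getD_set_self z i _ (by omega), hw]
        omega
      · rw [getD_set_ne z i _ j hji]
        exact hzv j hj1 (by omega)

theorem zinv (cs : List Char) (hlen : 1 ≤ cs.length) :
    ∀ m, m + 1 ≤ cs.length →
      ZInv cs m ((List.range' 1 m).foldl (zstep cs) (List.replicate cs.length 0, 0, 0)) := by
  intro m
  induction m with
  | zero =>
    intro _
    simp only [List.range'_zero, List.foldl_nil]
    unfold ZInv
    dsimp only
    refine ⟨by simp, by intro j h1 h2; omega, by omega, by omega, by omega, ?_⟩
    have : lcp cs 0 = cs.length := by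
      unfold lcp; simpa using lcpA_self cs
    omega
  | succ m ih =>
    intro hm
    have := List.range'_concat (step := 1) (s := 1) (n := m)
    rw [this, List.foldl_append]
    simp only [List.foldl_cons, List.foldl_nil]
    have h1m : 1 + 1 * m = m + 1 := by omega
    rw [h1m]
    exact zstep_inv cs m (by omega) _ (ih (by omega))

theorem calcZ_correct (cs : List Char) (hlen : 1 ≤ cs.length) :
    ∀ i, 1 ≤ i → i < cs.length → (calcZ cs).getD i 0 = lcp cs i := by
  intro i hi1 hi2
  have h := zinv cs hlen (cs.length - 1) (by omega)
  unfold calcZ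
  exact h.2.1 i hi1 (by omega)

-- the largest k ≤ bound with s[:k] a palindrome (0 if none)
def maxPal (t : List Char) : Nat → Nat
  | 0 => 0
  | k + 1 => if (t.take (k + 1)) = (t.take (k + 1)).reverse then k + 1 else maxPal t k

theorem maxPal_succ (t : List Char) (k : Nat) :
    maxPal t (k + 1) = if (t.take (k + 1)) = (t.take (k + 1)).reverse then k + 1 else maxPal t k :=
  rfl

theorem maxPal_le (t : List Char) : ∀ k, maxPal t k ≤ k := by
  intro k
  induction k with
  | zero => simp [maxPal]
  | succ k ih => unfold maxPal; split <;> omega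

theorem palLoop_eq (t : List Char) (n : Nat) :
    ∀ k, palLoop t n k = (n : Int) - (maxPal t k : Int) := by
  intro k
  induction k with
  | zero => simp [palLoop, maxPal]
  | succ k ih =>
    by_cases hp : (t.take (k + 1)) = (t.take (k + 1)).reverse
    · simp only [palLoop, maxPal, if_pos hp]
      push_cast; ring
    · simp only [palLoop, maxPal, if_neg hp, ih]

theorem cond_iff (t : List Char) (k : Nat) (hk1 : 1 ≤ k) (hkn : k ≤ t.length) :
    (k ≤ lcp (t ++ t.reverse) (2 * t.length - k) ↔ t.take k = (t.take k).reverse) := by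
  set n := t.length with hn
  have hdrop : (t ++ t.reverse).drop (2 * n - k) = t.reverse.drop (n - k) := by
    rw [List.drop_append]
    have h1 : t.drop (2 * n - k) = [] := List.drop_eq_nil_of_le (by omega)
    have h2 : 2 * n - k - t.length = n - k := by omega
    rw [h1, h2, List.nil_append]
  unfold lcp
  rw [hdrop, lcpA_ge_iff]
  have hlen2 : k ≤ (t ++ t.reverse).length := by simp; omega
  have hlend : (t.reverse.drop (n - k)).length = k := by simp; omega
  have htake1 : (t ++ t.reverse).take k = t.take k := List.take_append_of_le_length hkn
  have htake2 : (t.reverse.drop (n - k)).take k = t.reverse.drop (n - k) :=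
    List.take_of_length_le (le_of_eq hlend)
  have hrev : t.reverse.drop (n - k) = (t.take k).reverse := by
    rw [List.reverse_take]
  rw [htake1, htake2, hrev]
  constructor
  · rintro ⟨_, _, h⟩; exact h
  · intro h; exact ⟨hlen2, by simp; omega, h⟩

theorem afold (t : List Char) (z : List Nat)
    (hz : ∀ i, 1 ≤ i → i < 2 * t.length → z.getD i 0 = lcp (t ++ t.reverse) i) :
    ∀ k, k ≤ t.length → ∀ mf,
      (List.range' (2 * t.length - k) k).foldl
        (fun mf i => if z.getD i 0 ≥ (t ++ t.reverse).length - i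
                     then max mf ((t ++ t.reverse).length - i) else mf) mf
      = max mf (maxPal t k) := by
  intro k
  induction k with
  | zero => intro _ mf; simp [maxPal]
  | succ k ih =>
    intro hk mf
    have hlen : (t ++ t.reverse).length = 2 * t.length := by simp; omega
    simp only [List.range'_succ, List.foldl_cons]
    have hidx : 2 * t.length - (k + 1) + 1 = 2 * t.length - k := by omega
    rw [hidx]
    set i := 2 * t.length - (k + 1) with hi
    have hL : (t ++ t.reverse).length - i = k + 1 := by rw [hlen]; omega
    have hzi : z.getD i 0 = lcp (t ++ t.reverse) i :=
      hz i (by omega) (by omega)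
    have hciff : ((t ++ t.reverse).length - i ≤ z.getD i 0) ↔
        t.take (k + 1) = (t.take (k + 1)).reverse := by
      rw [hL, hzi]
      exact cond_iff t (k + 1) (by omega) hk
    have hmp := maxPal_le t k
    by_cases hpal : t.take (k + 1) = (t.take (k + 1)).reverse
    · rw [if_pos (by exact ge_iff_le.mpr (hciff.mpr hpal)), hL,
        ih (by omega) (max mf (k + 1))]
      rw [maxPal_succ, if_pos hpal]
      omega
    · rw [if_neg (fun hcon => hpal (hciff.mp hcon)), ih (by omega) mf,
        maxPal_succ, if_neg hpal]

theorem goof_eq (s : String) : goof s = goof_alt s := by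
  unfold goof goof_alt
  set t := s.toList with ht
  by_cases h0 : t.length = 0
  · have : t = [] := List.length_eq_zero_iff.mp h0
    rw [this]
    simp [calcZ, palLoop]
  · have hn : 1 ≤ t.length := by omega
    have hlen : (t ++ t.reverse).length = 2 * t.length := by simp; omega
    have hz := calcZ_correct (t ++ t.reverse) (by omega)
    have hz' : ∀ i, 1 ≤ i → i < 2 * t.length →
        (calcZ (t ++ t.reverse)).getD i 0 = lcp (t ++ t.reverse) i := by
      intro i h1 h2; exact hz i h1 (by omega)
    have hfold := afold t (calcZ (t ++ t.reverse)) hz' t.length (le_refl _) 0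
    have hrange : 2 * t.length - t.length = t.length := by omega
    rw [hrange] at hfold
    simp only
    rw [hfold, palLoop_eq]
    have := maxPal_le t t.length
    simp

-- ===== VERDICT (by name: the statement is the Claim_ definition above) =====
theorem goof_spec : Claim_equal_goof := by
  intro s _
  unfold Spec_goof
  exact goof_eq s
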